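-- pv_equiv track=rewrite | github.com/icepaule/IceUseCaseTesting | scripts/generate-mitre-lookup.py | assign_usecase_ids
-- ===== SOURCE A (Python) =====
-- from collections import defaultdict, OrderedDict
-- from typing import Dict, List, Tuple
--
-- USECASE_RANGES = OrderedDict([
--     ("credential-access",    (1, 19,   "Credential Access Detection")),
--     ("privilege-escalation", (20, 29,  "Privilege Escalation Detection")),
--     ("lateral-movement",     (30, 39,  "Lateral Movement Detection")),
--     ("defense-evasion",      (40, 59,  "Defense Evasion Detection")),
--     ("discovery",            (60, 79,  "Discovery and Reconnaissance Detection")),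
--     ("execution",            (80, 89,  "Suspicious Execution Detection")),
--     ("persistence",          (90, 99,  "Persistence Mechanism Detection")),
--     ("exfiltration",         (100, 109, "Data Exfiltration Detection")),
--     ("collection",           (110, 119, "Data Collection Detection")),
--     ("command-and-control",  (120, 129, "C2 Communication Detection")),
--     ("impact",               (130, 139, "System Impact Detection")),
--     ("initial-access",       (140, 149, "Initial Access Detection")),
-- ])
--
-- def assign_usecase_ids(techniques_by_tactic: Dict[str, List[Tuple[str, str]]]) -> Dict[str, Tuple[str, str]]:
--     """Assign UC-BANK-XXX IDs to technique groups."""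
--     technique_to_usecase = {}
--
--     for tactic, (start, end, base_name) in USECASE_RANGES.items():
--         techniques = techniques_by_tactic.get(tactic, [])
--         if not techniques:
--             continue
--
--         # Sort techniques
--         techniques.sort(key=lambda x: x[0])
--
--         # Group sub-techniques with parent
--         parent_groups = defaultdict(list)
--         for tid, tname in techniques:
--             parent = tid.split(".")[0]
--             parent_groups[parent].append((tid, tname))
--
--         # Assign IDs
--         current_id = start
--         for parent_tid in sorted(parent_groups.keys()):
--             if current_id > end:
--                 # Overflow - reuse last ID
--                 current_id = end
--
--             usecase_id = f"UC-BANK-{current_id:03d}"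
--
--             # Determine usecase name based on parent technique
--             group_techniques = parent_groups[parent_tid]
--             if len(group_techniques) == 1:
--                 usecase_name = f"{base_name} - {group_techniques[0][1]}"
--             else:
--                 usecase_name = f"{base_name} - {group_techniques[0][1]}"
--
--             # Truncate long names
--             if len(usecase_name) > 80:
--                 usecase_name = usecase_name[:77] + "..."
--
--             for tid, tname in group_techniques:
--                 technique_to_usecase[tid] = (usecase_id, usecase_name)
--
--             current_id += 1
--
--     return technique_to_usecase
-- ===== SOURCE B (Python) =====
-- from collections import OrderedDict
-- from typing import Dict, List, Tuple
--
-- USECASE_RANGES = OrderedDict([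
--     ("credential-access",    (1, 19,   "Credential Access Detection")),
--     ("privilege-escalation", (20, 29,  "Privilege Escalation Detection")),
--     ("lateral-movement",     (30, 39,  "Lateral Movement Detection")),
--     ("defense-evasion",      (40, 59,  "Defense Evasion Detection")),
--     ("discovery",            (60, 79,  "Discovery and Reconnaissance Detection")),
--     ("execution",            (80, 89,  "Suspicious Execution Detection")),
--     ("persistence",          (90, 99,  "Persistence Mechanism Detection")),
--     ("exfiltration",         (100, 109, "Data Exfiltration Detection")),
--     ("collection",           (110, 119, "Data Collection Detection")),
--     ("command-and-control",  (120, 129, "C2 Communication Detection")),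
--     ("impact",               (130, 139, "System Impact Detection")),
--     ("initial-access",       (140, 149, "Initial Access Detection")),
-- ])
--
-- def _truncate(name):
--     return name[:77] + "..." if len(name) > 80 else name
--
-- def _tactic_pairs(ts, start, end, base_name):
--     """Flat (tid, (usecase_id, usecase_name)) assignments for one tactic."""
--     parents = sorted({tid.split(".")[0] for tid, _ in ts})
--     return [(tid, ("UC-BANK-%03d" % min(start + i, end),
--                    _truncate(f"{base_name} - {grp[0][1]}")))
--             for i, parent in enumerate(parents)
--             for grp in [[p for p in ts if p[0].split(".")[0] == parent]]
--             for tid, _ in grp]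
--
-- def assign_usecase_ids(techniques_by_tactic: Dict[str, List[Tuple[str, str]]]) -> Dict[str, Tuple[str, str]]:
--     """Assign UC-BANK-XXX IDs to technique groups (same in-place sort of the caller's lists)."""
--     pairs = []
--     for tactic, (start, end, base_name) in USECASE_RANGES.items():
--         ts = techniques_by_tactic.get(tactic, [])
--         ts.sort(key=lambda x: x[0])
--         pairs += _tactic_pairs(ts, start, end, base_name)
--     return dict(pairs)
-- ===== Notes on version B (the rewrite author's own statement) =====
-- stated objective: alternative
-- what changed: Replaces A's stateful pass (defaultdict grouping, mutable clamped counter, incremental dict insertion) by a pure pipeline: per tactic a flat list of (tid,(id,name)) assignments is built by a comprehension over the enumerated sorted parent set with a closed-form min(start+i,end) clamp, and the result dict is constructed once at the end with dict(pairs).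
import Mathlib
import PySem

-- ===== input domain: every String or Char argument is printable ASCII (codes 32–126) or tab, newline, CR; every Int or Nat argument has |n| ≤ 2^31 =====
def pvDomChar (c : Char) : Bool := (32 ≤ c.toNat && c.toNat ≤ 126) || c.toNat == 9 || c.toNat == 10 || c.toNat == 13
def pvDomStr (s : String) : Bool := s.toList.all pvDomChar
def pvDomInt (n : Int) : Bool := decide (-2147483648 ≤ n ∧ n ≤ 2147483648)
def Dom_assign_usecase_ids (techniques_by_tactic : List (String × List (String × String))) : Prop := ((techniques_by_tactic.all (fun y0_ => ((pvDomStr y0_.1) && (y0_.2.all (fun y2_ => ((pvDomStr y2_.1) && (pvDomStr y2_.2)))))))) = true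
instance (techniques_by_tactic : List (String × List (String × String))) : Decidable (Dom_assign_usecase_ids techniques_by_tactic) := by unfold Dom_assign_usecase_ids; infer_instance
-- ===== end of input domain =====

-- B replaces A's stateful pass (defaultdict grouping, mutable clamped counter,
-- incremental dict insertion) by a pure pipeline: a flat list of assignments built
-- by a comprehension over the enumerated sorted parent set with a closed-form
-- min(start+i, end) clamp, turned into a dict once at the end (objective:
-- alternative decomposition, same cost). Both Pythons sort the caller's lists in
-- place identically; the equivalence proved is about the return value.


-- ===== PORT A =====
-- the module constant USECASE_RANGES
def pvUsecaseRanges : List (String × Int × Int × String) := [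
  ("credential-access",    (1, 19,   "Credential Access Detection")),
  ("privilege-escalation", (20, 29,  "Privilege Escalation Detection")),
  ("lateral-movement",     (30, 39,  "Lateral Movement Detection")),
  ("defense-evasion",      (40, 59,  "Defense Evasion Detection")),
  ("discovery",            (60, 79,  "Discovery and Reconnaissance Detection")),
  ("execution",            (80, 89,  "Suspicious Execution Detection")),
  ("persistence",          (90, 99,  "Persistence Mechanism Detection")),
  ("exfiltration",         (100, 109, "Data Exfiltration Detection")),
  ("collection",           (110, 119, "Data Collection Detection")),
  ("command-and-control",  (120, 129, "C2 Communication Detection")),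
  ("impact",               (130, 139, "System Impact Detection")),
  ("initial-access",       (140, 149, "Initial Access Detection"))]

-- tid.split(".")[0]  (split? is some on the nonempty separator "."; the list is never empty, index 0 in range)
def pvParent (tid : String) : String :=
  PySem.List.pyGetD ((PySem.Str.split? tid ".").getD []) 0 ""

-- A's inner loop body over sorted parent keys; state = (current_id, technique_to_usecase)
def pvStepA (stop : Int) (base : String) (pg : PySem.Dict String (List (String × String)))
    (st : Int × PySem.Dict String (String × String)) (parent : String) :
    Int × PySem.Dict String (String × String) :=
  let cur := if st.1 > stop then stop else st.1
  let uid := "UC-BANK-" ++ PySem.Str.zfill (PySem.Int.toStr cur) 3                  -- f"UC-BANK-{cur:03d}"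
  let g := pg.getD parent []
  let name := if g.length = 1 then base ++ " - " ++ (PySem.List.pyGetD g 0 ("", "")).2
              else base ++ " - " ++ (PySem.List.pyGetD g 0 ("", "")).2
  let name := if PySem.Str.len name > 80 then PySem.Str.slice name none (some 77) ++ "..." else name
  (cur + 1, g.foldl (fun d q => d.insert q.1 (uid, name)) st.2)

-- A's body for one (tactic, (start, end, base_name)) entry
def pvTacticA (tbt : List (String × List (String × String)))
    (acc : PySem.Dict String (String × String)) (entry : String × Int × Int × String) :
    PySem.Dict String (String × String) :=
  let techniques := (PySem.Dict.mk tbt).getD entry.1 []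
  if techniques = [] then acc
  else
    let ts := PySem.List.sorted techniques (fun x => x.1)
    let pg := ts.foldl (fun d p => d.modify (pvParent p.1) [] (fun l => l ++ [p])) PySem.Dict.empty
    ((PySem.List.sorted pg.keys (fun k => k)).foldl (pvStepA entry.2.2.1 entry.2.2.2 pg)
      (entry.2.1, acc)).2

def assign_usecase_ids (techniques_by_tactic : List (String × List (String × String))) : List (String × String × String) :=
  (pvUsecaseRanges.foldl (pvTacticA techniques_by_tactic) PySem.Dict.empty).items

-- ===== PORT B =====
-- _truncate
def pvTrunc (name : String) : String :=
  if PySem.Str.len name > 80 then PySem.Str.slice name none (some 77) ++ "..." else name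

-- the body of B's comprehension for one enumerated parent (i, parent)
def pvGroupPairs (start stop : Int) (base : String) (ts : List (String × String))
    (ip : Int × String) : List (String × String × String) :=
  let g := ts.filter (fun q => pvParent q.1 == ip.2)
  let uid := "UC-BANK-" ++ PySem.Str.zfill (PySem.Int.toStr (min (start + ip.1) stop)) 3
  let name := pvTrunc (base ++ " - " ++ (PySem.List.pyGetD g 0 ("", "")).2)
  g.map (fun q => (q.1, uid, name))

-- _tactic_pairs: the flat (tid, (id, name)) list for one tactic entry
def pvTacticPairs (tbt : List (String × List (String × String)))
    (entry : String × Int × Int × String) : List (String × String × String) :=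
  let ts := PySem.List.sorted ((PySem.Dict.mk tbt).getD entry.1 []) (fun x => x.1)
  let parents := PySem.List.sorted (PySem.Set.ofList (ts.map (fun p => pvParent p.1))) (fun k => k)
  (PySem.List.enumerate parents).flatMap (pvGroupPairs entry.2.1 entry.2.2.1 entry.2.2.2 ts)

-- pairs accumulated over all ranges, then dict(pairs)
def assign_usecase_ids_alt (techniques_by_tactic : List (String × List (String × String))) : List (String × String × String) :=
  (PySem.Dict.ofList (pvUsecaseRanges.flatMap (pvTacticPairs techniques_by_tactic))).items

-- ===== PRECONDITION & SPEC =====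
def Spec_assign_usecase_ids (techniques_by_tactic : List (String × List (String × String))) (out : List (String × String × String)) : Prop := out = assign_usecase_ids_alt techniques_by_tactic
instance (techniques_by_tactic : List (String × List (String × String))) (out : List (String × String × String)) : Decidable (Spec_assign_usecase_ids techniques_by_tactic out) := by unfold Spec_assign_usecase_ids; infer_instance

-- ===== CLAIM (what is proved, stated in full; the proofs are below) =====
def Claim_equal_assign_usecase_ids : Prop := ∀ (techniques_by_tactic : List (String × List (String × String))), Dom_assign_usecase_ids techniques_by_tactic → Spec_assign_usecase_ids techniques_by_tactic (assign_usecase_ids techniques_by_tactic)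

-- ===== LEMMAS AND PROOFS =====

-- keys of A's defaultdict grouping = B's set of parents (same first-occurrence order)
theorem pv_keys_eq (ts : List (String × String)) :
    (ts.foldl (fun d p => d.modify (pvParent p.1) [] (fun l => l ++ [p])) PySem.Dict.empty).keys
      = PySem.Set.ofList (ts.map (fun p => pvParent p.1)) := by
  rw [PySem.Dict.keys_foldl_modify_key ts (fun p => pvParent p.1) [] (fun _ p l => l ++ [p])]
  simp [PySem.Set.update_nil_left]

-- each group in A's defaultdict = B's filter of the sorted techniques
theorem pv_group_eq (ts : List (String × String)) (c : String) :
    (ts.foldl (fun d p => d.modify (pvParent p.1) [] (fun l => l ++ [p])) PySem.Dict.empty).getD c []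
      = ts.filter (fun q => pvParent q.1 == c) := by
  have h := PySem.Dict.getD_foldl_modify_append (ts.map (fun p => (pvParent p.1, p)))
      PySem.Dict.empty c
  rw [List.foldl_map] at h
  simpa [List.filter_map, Function.comp_def] using h

-- A's running-counter loop with the overflow clamp = inserting B's flat pair list
theorem pv_inner_eq (stop : Int) (base : String)
    (pg : PySem.Dict String (List (String × String))) (ts : List (String × String))
    (hg : ∀ c, pg.getD c [] = ts.filter (fun q => pvParent q.1 == c)) :
    ∀ (ks : List String) (s i : Int) (d : PySem.Dict String (String × String)),
      (ks.foldl (pvStepA stop base pg) (min (s + i) (stop + 1), d)).2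
        = ((PySem.List.enumerate ks i).flatMap (pvGroupPairs s stop base ts)).foldl
            (fun d q => d.insert q.1 q.2) d := by
  intro ks
  induction ks with
  | nil => intro s i d; rfl
  | cons p ks ih =>
    intro s i d
    have hA : pvStepA stop base pg (min (s + i) (stop + 1), d) p
        = (min (s + (i + 1)) (stop + 1),
           (pvGroupPairs s stop base ts (i, p)).foldl (fun d q => d.insert q.1 q.2) d) := by
      simp only [pvStepA, pvGroupPairs, pvTrunc, hg p, ite_self, List.foldl_map]
      have hcl : (if min (s + i) (stop + 1) > stop then stop else min (s + i) (stop + 1))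
          = min (s + i) stop := by omega
      rw [hcl, Prod.mk.injEq]
      exact ⟨by omega, rfl⟩
    rw [PySem.List.enumerate_cons, List.flatMap_cons, List.foldl_append,
        List.foldl_cons, hA, ih]

-- one tactic entry: A's body = inserting B's flat pair list (start ≤ end + 1 holds for every table entry)
theorem pv_tactic_eq (tbt : List (String × List (String × String)))
    (entry : String × Int × Int × String) (h : entry.2.1 ≤ entry.2.2.1 + 1)
    (acc : PySem.Dict String (String × String)) :
    pvTacticA tbt acc entry
      = (pvTacticPairs tbt entry).foldl (fun d q => d.insert q.1 q.2) acc := by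
  by_cases hemp : (PySem.Dict.mk tbt).getD entry.1 [] = []
  · simp only [pvTacticA, pvTacticPairs, hemp]
    rfl
  · simp only [pvTacticA, pvTacticPairs, if_neg hemp]
    rw [pv_keys_eq]
    conv_lhs => rw [show (entry.2.1 : Int) = min (entry.2.1 + 0) (entry.2.2.1 + 1) from by omega]
    exact pv_inner_eq entry.2.2.1 entry.2.2.2 _ _ (pv_group_eq _) _ entry.2.1 0 acc

-- the whole table: A's fold of dict updates = one insertion fold over B's concatenated pairs
theorem pv_fold_eq (tbt : List (String × List (String × String))) :
    ∀ (entries : List (String × Int × Int × String)),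
      (∀ en ∈ entries, en.2.1 ≤ en.2.2.1 + 1) →
      ∀ acc, entries.foldl (pvTacticA tbt) acc
        = (entries.flatMap (pvTacticPairs tbt)).foldl (fun d q => d.insert q.1 q.2) acc := by
  intro entries
  induction entries with
  | nil => intro _ acc; rfl
  | cons e es ih =>
    intro h acc
    rw [List.flatMap_cons, List.foldl_append, List.foldl_cons,
        pv_tactic_eq tbt e (h e (by simp)) acc, ih (fun en hen => h en (by simp [hen]))]

-- ===== VERDICT (by name: the statement is the Claim_ definition above) =====
theorem assign_usecase_ids_spec : Claim_equal_assign_usecase_ids := by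
  intro tbt _
  show assign_usecase_ids tbt = assign_usecase_ids_alt tbt
  unfold assign_usecase_ids assign_usecase_ids_alt
  rw [pv_fold_eq tbt pvUsecaseRanges (by decide)]
  rfl
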